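-- pv_equiv track=rewrite | github.com/ag502/algorithm | Problem/BOJ_13333_Q-인덱스/main.py | find_q_index
-- ===== SOURCE A (Python) =====
-- def find_q_index(index, paper_list):
--     num_of_below, num_of_above, num_of_same = 0, 0, 0
--     num_of_paper = len(paper_list)
--
--     for reference_time in paper_list:
--         if reference_time >= index:
--             num_of_above += 1
--             if reference_time == index:
--                 num_of_same += 1
--         else:
--             num_of_below += 1
--
--     if num_of_above >= index:
--         if num_of_below == num_of_paper - index:
--             return True
--         else:
--             while num_of_same != 0:
--                 num_of_above -= 1
--                 num_of_below += 1
--                 num_of_same -= 1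
--
--                 if num_of_above < index:
--                     return False
--                 else:
--                     if num_of_below == num_of_paper - index:
--                         return True
--     return False
-- ===== SOURCE B (Python) =====
-- def find_q_index(index, paper_list):
--     at_least = sum(1 for t in paper_list if t >= index)
--     greater = sum(1 for t in paper_list if t > index)
--     return at_least >= index and greater <= index
-- ===== Notes on version B (the rewrite author's own statement) =====
-- stated objective: simpler
-- what changed: Replaced the count-then-simulate while-loop (which reclassifies '== index' papers one by one) with a single closed-form test: #(papers >= index) >= index and #(papers > index) <= index.
import Mathlib
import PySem

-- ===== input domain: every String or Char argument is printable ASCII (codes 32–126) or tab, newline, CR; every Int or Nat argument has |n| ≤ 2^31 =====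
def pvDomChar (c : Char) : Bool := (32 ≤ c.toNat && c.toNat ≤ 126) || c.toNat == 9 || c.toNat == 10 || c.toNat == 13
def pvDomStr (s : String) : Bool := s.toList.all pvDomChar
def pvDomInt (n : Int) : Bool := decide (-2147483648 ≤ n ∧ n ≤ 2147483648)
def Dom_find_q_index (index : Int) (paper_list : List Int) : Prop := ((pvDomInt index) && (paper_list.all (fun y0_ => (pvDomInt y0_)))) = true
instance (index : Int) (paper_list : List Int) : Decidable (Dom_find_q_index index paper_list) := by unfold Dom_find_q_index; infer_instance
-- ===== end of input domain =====

-- B replaces A's while-loop simulation by a closed-form two-count test (objective: simpler).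

-- ===== PORT A =====
-- A's while loop; the loop variable num_of_same is always a nonnegative count at every entry,
-- so Python's guard `same != 0` is written `0 < same` to make the recursion terminate (same computation).
def findQWhile (above below same npaper index : Int) : Bool :=
  if 0 < same then
    let above' := above - 1
    let below' := below + 1
    let same' := same - 1
    if above' < index then false
    else if below' = npaper - index then true
    else findQWhile above' below' same' npaper index
  else false
termination_by same.toNat
decreasing_by omega

def find_q_index (index : Int) (paper_list : List Int) : Bool :=
  let st := paper_list.foldl (fun (s : Int × Int × Int) reference_time =>
      let (below, above, same) := s
      if index ≤ reference_time then
        (below, above + 1, if reference_time = index then same + 1 else same)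
      else (below + 1, above, same)) (0, 0, 0)
  let num_of_paper : Int := paper_list.length
  let (num_of_below, num_of_above, num_of_same) := st
  if index ≤ num_of_above then
    if num_of_below = num_of_paper - index then true
    else findQWhile num_of_above num_of_below num_of_same num_of_paper index
  else false

-- ===== PORT B =====
def find_q_index_alt (index : Int) (paper_list : List Int) : Bool :=
  let at_least : Int := (paper_list.countP (fun t => index ≤ t) : Nat)
  let greater : Int := (paper_list.countP (fun t => index < t) : Nat)
  index ≤ at_least && greater ≤ index

-- ===== PRECONDITION & SPEC =====
def Spec_find_q_index (index : Int) (paper_list : List Int) (out : Bool) : Prop := out = find_q_index_alt index paper_list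
instance (index : Int) (paper_list : List Int) (out : Bool) : Decidable (Spec_find_q_index index paper_list out) := by unfold Spec_find_q_index; infer_instance

-- ===== CLAIM (what is proved, stated in full; the proofs are below) =====
def Claim_equal_find_q_index : Prop := ∀ (index : Int) (paper_list : List Int), Dom_find_q_index index paper_list → Spec_find_q_index index paper_list (find_q_index index paper_list)

-- ===== LEMMAS AND PROOFS =====

-- Characterisation of A's while loop, under the invariant above + below = npaper.
theorem findQWhile_eq (index npaper : Int) : ∀ (s : Nat) (above below : Int),
    above + below = npaper →
    findQWhile above below (s : Int) npaper index
      = decide (1 ≤ above - index ∧ above - index ≤ (s : Int)) := by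
  intro s
  induction s with
  | zero =>
    intro above below h
    rw [findQWhile]
    simp
    omega
  | succ k ih =>
    intro above below h
    rw [findQWhile]
    have hpos : (0 : Int) < ((k + 1 : Nat) : Int) := by push_cast; omega
    simp only [hpos, if_true]
    have hsub : ((k + 1 : Nat) : Int) - 1 = (k : Int) := by push_cast; omega
    by_cases h1 : above - 1 < index
    · simp only [h1, if_true]
      simp
      omega
    · simp only [h1, if_false]
      by_cases h2 : below + 1 = npaper - index
      · simp only [h2, if_true]
        simp
        omega
      · simp only [h2, if_false]
        rw [hsub, ih (above - 1) (below + 1) (by omega)]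
        have : (1 ≤ above - 1 - index ∧ above - 1 - index ≤ (k : Int))
             ↔ (1 ≤ above - index ∧ above - index ≤ ((k + 1 : Nat) : Int)) := by
          push_cast; constructor <;> intro hx <;> omega
        simp only [decide_eq_decide]
        exact this

-- The counting fold computes (countP (< index), countP (≥ index), countP (= index)).
theorem foldA_counts (index : Int) : ∀ (l : List Int) (b a s : Int),
    l.foldl (fun (st : Int × Int × Int) reference_time =>
      let (below, above, same) := st
      if index ≤ reference_time then
        (below, above + 1, if reference_time = index then same + 1 else same)
      else (below + 1, above, same)) (b, a, s)
    = (b + (l.countP (fun t => decide (t < index)) : Nat),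
       a + (l.countP (fun t => decide (index ≤ t)) : Nat),
       s + (l.countP (fun t => decide (t = index)) : Nat)) := by
  intro l
  induction l with
  | nil => intro b a s; simp
  | cons x xs ih =>
    intro b a s
    simp only [List.foldl_cons, List.countP_cons]
    by_cases hx : index ≤ x
    · by_cases he : x = index
      · simp only [if_true, he, ih]
        have h1 : ¬ (index < index) := lt_irrefl _
        subst he
        simp [h1, hx]
        constructor <;> omega
      · simp only [hx, if_true, he, if_false, ih]
        have h1 : ¬ (x < index) := not_lt.mpr hx
        simp [h1, he]
        omega
    · have h1 : x < index := lt_of_not_ge hx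
      have he : ¬ (x = index) := by omega
      simp only [hx, if_false, ih]
      simp [h1, he]
      omega

-- countP (≥) splits into countP (>) plus countP (=), and below + above = length.
theorem countP_split (index : Int) (l : List Int) :
    l.countP (fun t => decide (index ≤ t))
      = l.countP (fun t => decide (index < t)) + l.countP (fun t => decide (t = index))
    ∧ l.countP (fun t => decide (t < index)) + l.countP (fun t => decide (index ≤ t)) = l.length := by
  induction l with
  | nil => simp
  | cons x xs ih =>
    obtain ⟨ih1, ih2⟩ := ih
    simp only [List.countP_cons, List.length_cons, decide_eq_true_eq]
    constructor <;> split_ifs <;> omega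

-- ===== VERDICT (by name: the statement is the Claim_ definition above) =====
theorem find_q_index_spec : Claim_equal_find_q_index := by
  intro index l _
  unfold Spec_find_q_index find_q_index find_q_index_alt
  rw [foldA_counts]
  obtain ⟨hsplit, hlen⟩ := countP_split index l
  simp only [zero_add]
  rw [← Bool.decide_and]
  by_cases hge : index ≤ ((l.countP (fun t => decide (index ≤ t)) : Nat) : Int)
  · rw [if_pos hge]
    by_cases hb : ((l.countP (fun t => decide (t < index)) : Nat) : Int)
        = ((l.length : Nat) : Int) - index
    · rw [if_pos hb]
      exact (decide_eq_true ⟨hge, by omega⟩).symm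
    · rw [if_neg hb]
      rw [findQWhile_eq index (l.length : Int) (l.countP (fun t => decide (t = index)))
            _ _ (by omega)]
      rw [decide_eq_decide]
      constructor <;> intro hx <;> exact ⟨by omega, by omega⟩
  · rw [if_neg hge]
    exact (decide_eq_false (fun hx => hge hx.1)).symm
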